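-- pv_equiv track=rewrite | github.com/divyesh27/temp | PythonPractice/src/ConvertStringOneToAnotherStringFindMinCount.py | steps_to_convert_one_string_to_another_string
-- ===== SOURCE A (Python) =====
-- def steps_to_convert_one_string_to_another_string(str1: str, str2: str) -> int:
--     if not isinstance(str1, str) or not isinstance(str2, str):
--         raise TypeError("Both inputs must be strings")
--
--     if str1 is None or str2 is None:
--         raise ValueError("Input strings cannot be None")
--
--     if len(str1) != len(str2):
--         return -1
--
--     # Create frequency maps for both strings
--     frequency_map = {}
--
--     for c in str1:
--         frequency_map[c] = frequency_map.get(c, 0) + 1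
--
--     for c in str2:
--         if c in frequency_map:
--             frequency_map[c] -= 1
--         else:
--             return -1
--
--     # Check if all frequencies are zero
--     if any(count != 0 for count in frequency_map.values()):
--         return -1
--
--     # Calculate minimum steps to convert str1 to str2
--     result = 0
--     s1len = len(str1) - 1
--     s2len = len(str2) - 1
--
--     while s1len >= 0:
--         if str1[s1len] != str2[s2len]:
--             result += 1
--         else:
--             s2len -= 1
--         s1len -= 1
--
--     return result
-- ===== SOURCE B (Python) =====
-- def steps_to_convert_one_string_to_another_string(str1: str, str2: str) -> int:
--     if not isinstance(str1, str) or not isinstance(str2, str):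
--         raise TypeError("Both inputs must be strings")
--
--     n = len(str1)
--     if n != len(str2):
--         return -1
--
--     # sort-and-compare anagram check instead of A's frequency map
--     if sorted(str1) != sorted(str2):
--         return -1
--
--     def is_subseq(t: str, s: str) -> bool:
--         it = iter(s)
--         return all(c in it for c in t)
--
--     # binary search for the largest m such that the last m characters of str2
--     # already appear in order (as a subsequence) inside str1; the remaining
--     # n - m characters each cost one step.
--     lo, hi = 0, n
--     while lo < hi:
--         mid = (lo + hi + 1) // 2
--         if is_subseq(str2[n - mid:], str1):
--             lo = mid
--         else:
--             hi = mid - 1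
--     return n - lo
-- ===== Notes on version B (the rewrite author's own statement) =====
-- stated objective: alternative
-- what changed: B replaces A's frequency-map anagram validation with a sort-and-compare check, and replaces A's backward two-pointer mismatch-counting loop entirely: B binary-searches for the largest m such that the last m characters of str2 are a subsequence of str1 (tested with a greedy iterator-based is_subseq) and returns n - m; correctness rests on greedy-subsequence optimality and monotonicity of the suffix-subsequence predicate.
import Mathlib
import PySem

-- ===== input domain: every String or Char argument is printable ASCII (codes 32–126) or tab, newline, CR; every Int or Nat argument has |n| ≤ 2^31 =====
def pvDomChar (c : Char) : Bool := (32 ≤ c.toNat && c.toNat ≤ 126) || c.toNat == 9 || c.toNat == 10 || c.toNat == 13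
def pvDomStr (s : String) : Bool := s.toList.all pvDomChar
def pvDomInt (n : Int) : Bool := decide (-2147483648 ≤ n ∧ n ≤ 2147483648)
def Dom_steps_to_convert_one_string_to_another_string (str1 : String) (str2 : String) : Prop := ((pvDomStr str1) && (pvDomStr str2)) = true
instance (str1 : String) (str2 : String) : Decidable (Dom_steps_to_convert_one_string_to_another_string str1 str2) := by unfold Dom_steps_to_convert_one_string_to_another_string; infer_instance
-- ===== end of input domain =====

-- B replaces A's frequency-map anagram check by sort-and-compare, and A's backward
-- two-pointer mismatch-counting loop by a binary search for the largest m such that the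
-- last m characters of str2 are a subsequence of str1, returning n - m
-- (objective: alternative, same result proved equal).

-- ===== PORT A =====
-- the 'for c in str2' loop with its early 'return -1' (none = that early return)
def pvAProcess (d : PySem.Dict Char Int) : List Char → Option (PySem.Dict Char Int)
  | [] => some d
  | c :: rest =>
    if d.contains c then pvAProcess (d.modify c 0 (· - 1)) rest else none

-- the final 'while s1len >= 0' loop; first argument n is s1len + 1 (loop runs while n > 0).
-- Indices are always in range here (s2len ≥ s1len ≥ 0 throughout, proved below), so the
-- Option-valued pyGet? comparison is exactly Python's character comparison.
def pvAWhile (l1 l2 : List Char) : Nat → Int → Int → Int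
  | 0, _, result => result
  | n + 1, s2len, result =>
    if PySem.List.pyGet? l1 (n : Int) ≠ PySem.List.pyGet? l2 s2len then
      pvAWhile l1 l2 n s2len (result + 1)
    else
      pvAWhile l1 l2 n (s2len - 1) result

def steps_to_convert_one_string_to_another_string (str1 : String) (str2 : String) : Int :=
  let l1 := str1.toList
  let l2 := str2.toList
  if l1.length ≠ l2.length then -1
  else
    let frequency_map := l1.foldl (fun d c => d.insert c (d.getD c 0 + 1)) PySem.Dict.empty
    match pvAProcess frequency_map l2 with
    | none => -1
    | some fm =>
      if fm.values.any (fun count => count != 0) then -1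
      else pvAWhile l1 l2 l1.length ((l2.length : Int) - 1) 0

-- ===== PORT B =====
-- is_subseq(t, s): the iterator trick 'all(c in it for c in t)' consumes s greedily
def pvIsSub : List Char → List Char → Bool
  | t, [] => t.isEmpty
  | t, d :: s =>
    match t with
    | [] => true
    | c :: t' => if c = d then pvIsSub t' s else pvIsSub (c :: t') s

-- the 'while lo < hi' binary-search loop of B
def pvBS (l1 l2 : List Char) (n : Nat) (lo hi : Nat) : Nat :=
  if h : lo < hi then
    let mid := (lo + hi + 1) / 2
    if pvIsSub (PySem.List.slice l2 (some ((n : Int) - (mid : Int))) none) l1 then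
      pvBS l1 l2 n mid hi
    else
      pvBS l1 l2 n lo (mid - 1)
  else lo
termination_by hi - lo
decreasing_by
  · omega
  · omega

def steps_to_convert_one_string_to_another_string_alt (str1 : String) (str2 : String) : Int :=
  let l1 := str1.toList
  let l2 := str2.toList
  let n := l1.length
  if n ≠ l2.length then -1
  else if PySem.List.sorted l1 (fun x => x) ≠ PySem.List.sorted l2 (fun x => x) then -1
  else (n : Int) - (pvBS l1 l2 n 0 n : Int)

-- ===== PRECONDITION & SPEC =====
def Spec_steps_to_convert_one_string_to_another_string (str1 : String) (str2 : String) (out : Int) : Prop := out = steps_to_convert_one_string_to_another_string_alt str1 str2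
instance (str1 : String) (str2 : String) (out : Int) : Decidable (Spec_steps_to_convert_one_string_to_another_string str1 str2 out) := by unfold Spec_steps_to_convert_one_string_to_another_string; infer_instance

-- ===== CLAIM (what is proved, stated in full; the proofs are below) =====
def Claim_equal_steps_to_convert_one_string_to_another_string : Prop := ∀ (str1 : String) (str2 : String), Dom_steps_to_convert_one_string_to_another_string str1 str2 → Spec_steps_to_convert_one_string_to_another_string str1 str2 (steps_to_convert_one_string_to_another_string str1 str2)

-- ===== LEMMAS AND PROOFS =====

-- greedy backward matching count: pvGreedy s t scans s left to right, consuming the head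
-- of t on each match; it is the length of the longest prefix of t that is a sublist of s.
def pvGreedy : List Char → List Char → Nat
  | [], _ => 0
  | c :: s, t =>
    match t with
    | [] => 0
    | d :: t' => if c = d then pvGreedy s t' + 1 else pvGreedy s t

theorem pvGreedy_le (s t : List Char) : pvGreedy s t ≤ s.length := by
  induction s generalizing t with
  | nil => simp [pvGreedy]
  | cons c s ih =>
    cases t with
    | nil => simp [pvGreedy]
    | cons d t' =>
      by_cases h : c = d <;> simp [pvGreedy, h] <;>
        [exact ih t'; exact Nat.le_succ_of_le (ih (d :: t'))]

theorem pvGreedy_take_sublist (s t : List Char) : (t.take (pvGreedy s t)).Sublist s := by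
  induction s generalizing t with
  | nil => simp [pvGreedy]
  | cons c s ih =>
    cases t with
    | nil => simp [pvGreedy]
    | cons d t' =>
      by_cases h : c = d
      · subst h
        simpa [pvGreedy] using List.Sublist.cons₂ c (ih t')
      · simpa [pvGreedy, h] using List.Sublist.cons c (ih (d :: t'))

theorem pvGreedy_max (s t : List Char) (m : Nat) (h : (t.take m).Sublist s) :
    min m t.length ≤ pvGreedy s t := by
  induction s generalizing t m with
  | nil =>
    have h0 : t.take m = [] := List.sublist_nil.mp h
    have h1 : (t.take m).length = 0 := by rw [h0]; rfl
    simp only [List.length_take] at h1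
    simp only [pvGreedy]
    omega
  | cons c s ih =>
    cases t with
    | nil => simp
    | cons d t' =>
      cases m with
      | zero => simp
      | succ k =>
        simp only [List.take_succ_cons] at h
        -- from d :: t'.take k <+ c :: s we get t'.take k <+ s in both sublist cases
        have htail : (t'.take k).Sublist s := by
          cases h with
          | cons _ h2 => exact List.sublist_of_cons_sublist h2
          | cons₂ _ h2 => exact h2
        by_cases hcd : c = d
        · have := ih t' k htail
          subst hcd
          rw [show pvGreedy (c :: s) (c :: t') = pvGreedy s t' + 1 from by simp [pvGreedy]]
          simp only [List.length_cons]
          omega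
        · -- head d ≠ c, so the whole take survives into s
          have hwhole : ((d :: t').take (k + 1)).Sublist s := by
            simp only [List.take_succ_cons]
            cases h with
            | cons _ h2 => exact h2
            | cons₂ _ h2 => exact absurd rfl hcd
          have := ih (d :: t') (k + 1) hwhole
          rw [show pvGreedy (c :: s) (d :: t') = pvGreedy s (d :: t') from by simp [pvGreedy, hcd]]
          exact this

-- pvIsSub decides the sublist relation
theorem pvIsSub_iff (t s : List Char) : pvIsSub t s = true ↔ t.Sublist s := by
  induction s generalizing t with
  | nil =>
    cases t <;> simp [pvIsSub]
  | cons d s ih =>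
    cases t with
    | nil => simp [pvIsSub]
    | cons c t' =>
      by_cases h : c = d
      · subst h
        rw [show pvIsSub (c :: t') (c :: s) = pvIsSub t' s from by simp [pvIsSub]]
        rw [ih]
        exact ⟨fun h2 => List.Sublist.cons₂ c h2, fun h2 => List.cons_sublist_cons.mp h2⟩
      · simp only [pvIsSub, if_neg h, ih]
        constructor
        · exact fun h2 => List.Sublist.cons d h2
        · intro h2
          cases h2 with
          | cons _ h3 => exact h3
          | cons₂ _ h3 => exact absurd rfl h
  
-- binary search returns G when the predicate is 'm ≤ G' on [0,n]
theorem pvBS_eq (l1 l2 : List Char) (n G : Nat)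
    (hmono : ∀ m, m ≤ n → (pvIsSub (PySem.List.slice l2 (some ((n : Int) - (m : Int))) none) l1 = true ↔ m ≤ G)) :
    ∀ (k lo hi : Nat), hi - lo ≤ k → lo ≤ G → G ≤ hi → hi ≤ n → pvBS l1 l2 n lo hi = G := by
  intro k
  induction k with
  | zero =>
    intro lo hi hk hlo hhi hn
    rw [pvBS]
    rw [dif_neg (by omega)]
    omega
  | succ k ih =>
    intro lo hi hk hlo hhi hn
    rw [pvBS]
    by_cases h : lo < hi
    · rw [dif_pos h]
      have hmid1 : lo < (lo + hi + 1) / 2 := by omega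
      have hmid2 : (lo + hi + 1) / 2 ≤ hi := by omega
      by_cases hp : pvIsSub (PySem.List.slice l2 (some ((n : Int) - (((lo + hi + 1) / 2 : Nat) : Int))) none) l1 = true
      · simp only [hp, if_true]
        have hle : (lo + hi + 1) / 2 ≤ G := (hmono _ (by omega)).mp hp
        exact ih _ hi (by omega) hle hhi hn
      · simp only [hp]
        have hgt : ¬ ((lo + hi + 1) / 2 ≤ G) := fun hle => hp ((hmono _ (by omega)).mpr hle)
        exact ih lo _ (by omega) hlo (by omega) (by omega)
    · rw [dif_neg h]
      omega

-- If every char of l is a key of d, the loop never takes its early return and just decrements.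
theorem pvAProcess_eq_some (l : List Char) (d : PySem.Dict Char Int)
    (h : ∀ c ∈ l, d.contains c = true) :
    pvAProcess d l = some (l.foldl (fun d c => d.modify c 0 (· - 1)) d) := by
  induction l generalizing d with
  | nil => rfl
  | cons c rest ih =>
    have hc : d.contains c = true := h c (by simp)
    simp only [pvAProcess, hc, if_true, List.foldl_cons]
    exact ih _ (fun c' hc' => by
      rw [PySem.Dict.contains_modify]
      simp [h c' (by simp [hc'])])

-- If some char of l is missing from d, the loop takes the early return.
theorem pvAProcess_eq_none (l : List Char) (d : PySem.Dict Char Int)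
    (h : ¬ ∀ c ∈ l, d.contains c = true) :
    pvAProcess d l = none := by
  induction l generalizing d with
  | nil => exact absurd (by simp) h
  | cons c rest ih =>
    by_cases hc : d.contains c = true
    · simp only [pvAProcess, hc, if_true]
      refine ih _ (fun hall => h ?_)
      intro c' hc'
      rcases List.mem_cons.mp hc' with hc' | hc'
      · subst hc'; exact hc
      · have := hall c' hc'
        rw [PySem.Dict.contains_modify] at this
        rcases Bool.or_eq_true_iff.mp this with h1 | h1
        · rw [eq_of_beq h1]; exact hc
        · exact h1
    · simp [pvAProcess, hc]

-- value of the decrementing fold at any key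
theorem getD_foldl_modify_sub_one (l : List Char) (d : PySem.Dict Char Int) (v : Char) :
    (l.foldl (fun d c => d.modify c 0 (· - 1)) d).getD v 0 = d.getD v 0 - l.count v := by
  induction l generalizing d with
  | nil => simp
  | cons c rest ih =>
    simp only [List.foldl_cons, ih, PySem.Dict.getD_modify, List.count_cons]
    by_cases hvc : v = c
    · subst hvc; simp; ring
    · simp [hvc]
      exact fun h => hvc h.symm

-- invariant tying A's backward while loop to the greedy matching count pvGreedy
theorem pvAWhile_greedy (l1 l2 : List Char) :
    ∀ (n j : Nat) (result : Int), n ≤ l1.length → j + n ≤ l2.length →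
    pvAWhile l1 l2 n ((l2.length : Int) - 1 - (j : Int)) result
      = result + n - pvGreedy ((l1.take n).reverse) (l2.reverse.drop j) := by
  intro n
  induction n with
  | zero =>
    intro j result _ _
    simp [pvAWhile, pvGreedy]
  | succ n ih =>
    intro j result hn hj
    have hlt : n < l1.length := by omega
    have hjlt : j < l2.length := by omega
    have hidx : l2.length - 1 - j < l2.length := by omega
    have htake : (l1.take (n + 1)).reverse = l1[n] :: (l1.take n).reverse := by
      rw [List.take_add_one]
      simp [List.getElem?_eq_getElem hlt]
    have hjr : j < l2.reverse.length := by simpa using hjlt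
    have hrev : l2.reverse[j]'hjr = l2[l2.length - 1 - j]'hidx := by
      rw [List.getElem_reverse]
    have hdrop : l2.reverse.drop j = l2[l2.length - 1 - j]'hidx :: l2.reverse.drop (j + 1) := by
      rw [List.drop_eq_getElem_cons hjr, hrev]
    have hga : PySem.List.pyGet? l1 (n : Int) = some l1[n] := by
      rw [PySem.List.pyGet?_natCast, List.getElem?_eq_getElem hlt]
    have hcast : (l2.length : Int) - 1 - (j : Int) = ((l2.length - 1 - j : Nat) : Int) := by
      omega
    have hgb : PySem.List.pyGet? l2 ((l2.length : Int) - 1 - (j : Int)) = some (l2[l2.length - 1 - j]'hidx) := by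
      rw [hcast, PySem.List.pyGet?_natCast, List.getElem?_eq_getElem hidx]
    by_cases heq : l1[n] = l2[l2.length - 1 - j]'hidx
    · have : pvGreedy ((l1.take (n+1)).reverse) (l2.reverse.drop j)
          = pvGreedy ((l1.take n).reverse) (l2.reverse.drop (j + 1)) + 1 := by
        rw [htake, hdrop]
        simp only [pvGreedy]
        rw [if_pos heq]
      rw [this]
      simp only [pvAWhile, hga, hgb]
      rw [if_neg (by simp [heq])]
      have hs2 : (l2.length : Int) - 1 - (j : Int) - 1 = (l2.length : Int) - 1 - ((j + 1 : Nat) : Int) := by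
        push_cast; ring
      rw [hs2]
      have := ih (j + 1) result (by omega) (by omega)
      push_cast at this ⊢
      omega
    · have : pvGreedy ((l1.take (n+1)).reverse) (l2.reverse.drop j)
          = pvGreedy ((l1.take n).reverse) (l2.reverse.drop j) := by
        rw [htake, hdrop]
        simp only [pvGreedy]
        rw [if_neg heq]
      rw [this]
      simp only [pvAWhile, hga, hgb]
      rw [if_pos (by simp [heq])]
      have := ih j (result + 1) (by omega) (by omega)
      push_cast at this ⊢
      omega

-- in the anagram case the binary-search predicate is exactly 'm ≤ pvGreedy l1.reverse l2.reverse'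
theorem pvPred_iff (l1 l2 : List Char) (hl : l1.length = l2.length) (m : Nat) (hm : m ≤ l1.length) :
    (pvIsSub (PySem.List.slice l2 (some ((l1.length : Int) - (m : Int))) none) l1 = true
      ↔ m ≤ pvGreedy l1.reverse l2.reverse) := by
  have hslice : PySem.List.slice l2 (some ((l1.length : Int) - (m : Int))) none
      = l2.drop (l1.length - m) := by
    have : (l1.length : Int) - (m : Int) = ((l1.length - m : Nat) : Int) := by omega
    rw [this, PySem.List.slice_from_natCast]
  rw [hslice, pvIsSub_iff]
  have hrev : (l2.drop (l1.length - m)).reverse = l2.reverse.take m := by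
    rw [List.reverse_drop]
    congr 1
    omega
  rw [← List.reverse_sublist, hrev]
  constructor
  · intro h
    have := pvGreedy_max l1.reverse l2.reverse m h
    have hlen : l2.reverse.length = l1.length := by simp [hl]
    omega
  · intro h
    have h1 : l2.reverse.take m = (l2.reverse.take (pvGreedy l1.reverse l2.reverse)).take m := by
      rw [List.take_take]
      congr 1
      omega
    rw [h1]
    exact (List.take_sublist _ _).trans (pvGreedy_take_sublist l1.reverse l2.reverse)

-- A = B as bare functions
theorem pv_main (str1 str2 : String) :
    steps_to_convert_one_string_to_another_string str1 str2
      = steps_to_convert_one_string_to_another_string_alt str1 str2 := by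
  simp only [steps_to_convert_one_string_to_another_string,
    steps_to_convert_one_string_to_another_string_alt]
  set l1 := str1.toList with hl1
  set l2 := str2.toList with hl2
  by_cases hlen : l1.length = l2.length
  · rw [if_neg (by simp [hlen]), if_neg (by simp [hlen])]
    rw [PySem.Dict.foldl_insert_getD_add_one_eq_counter]
    have hnd : (List.foldl (fun d c => d.modify c 0 (· - 1)) (PySem.Dict.counter l1) l2).keys.Nodup :=
      PySem.Dict.nodup_keys_foldl_modify_key l2 (fun c => c) 0 (fun _ _ => (· - 1)) _
        (PySem.Dict.nodup_keys_counter l1)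
    by_cases hperm : l1.Perm l2
    · have hsort : (PySem.List.sorted l1 (fun x => x)) = PySem.List.sorted l2 (fun x => x) :=
        (PySem.List.sorted_id_eq_sorted_id_iff_perm l1 l2).mpr hperm
      rw [if_neg (by simp [hsort])]
      have hcont : ∀ c ∈ l2, (PySem.Dict.counter l1).contains c = true := by
        intro c hc
        rw [PySem.Dict.contains_counter]
        exact List.contains_iff_mem.mpr (hperm.mem_iff.mpr hc)
      rw [pvAProcess_eq_some l2 _ hcont]
      have hval : (List.foldl (fun d c => d.modify c 0 (· - 1)) (PySem.Dict.counter l1) l2).values.any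
          (fun count => count != 0) = false := by
        rw [List.any_eq_false]
        intro v hv
        rw [PySem.Dict.values_eq_map_keys _ hnd 0] at hv
        rcases List.mem_map.mp hv with ⟨c, _, rfl⟩
        rw [getD_foldl_modify_sub_one, PySem.Dict.getD_counter]
        have := List.perm_iff_count.mp hperm c
        simp [this]
      simp only [hval, Bool.false_eq_true, if_false]
      -- A side: the while loop computes len - greedy
      have hA := pvAWhile_greedy l1 l2 l1.length 0 0 (le_refl _) (by omega)
      simp only [Nat.cast_zero, sub_zero, List.take_length, List.drop_zero, zero_add] at hA
      rw [hA]
      -- B side: the binary search returns greedy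
      have hG : pvGreedy l1.reverse l2.reverse ≤ l1.length := by
        have := pvGreedy_le l1.reverse l2.reverse
        simpa using this
      have hB := pvBS_eq l1 l2 l1.length (pvGreedy l1.reverse l2.reverse)
        (fun m hm => pvPred_iff l1 l2 hlen m hm)
        l1.length 0 l1.length (by omega) (by omega) hG (le_refl _)
      rw [hB]
    · have hsort : ¬ (PySem.List.sorted l1 (fun x => x)) = PySem.List.sorted l2 (fun x => x) :=
        fun h => hperm ((PySem.List.sorted_id_eq_sorted_id_iff_perm l1 l2).mp h)
      rw [if_pos (by simpa using hsort)]
      by_cases hcont : ∀ c ∈ l2, (PySem.Dict.counter l1).contains c = true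
      · rw [pvAProcess_eq_some l2 _ hcont]
        obtain ⟨a, ha⟩ : ∃ a, List.count a l1 ≠ List.count a l2 := by
          by_contra h
          exact hperm (List.perm_iff_count.mpr fun a => Classical.byContradiction fun hne => h ⟨a, hne⟩)
        have hmem : a ∈ (List.foldl (fun d c => d.modify c 0 (· - 1)) (PySem.Dict.counter l1) l2).keys := by
          rw [PySem.Dict.keys_foldl_modify l2 0 (fun _ _ => (· - 1)), PySem.Set.mem_update]
          by_cases hal1 : a ∈ l1
          · left
            rw [PySem.Dict.keys_counter]
            exact (PySem.Set.mem_ofList l1 a).mpr hal1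
          · right
            by_contra hal2
            exact ha (by rw [List.count_eq_zero_of_not_mem hal1, List.count_eq_zero_of_not_mem hal2])
        have hany : (List.foldl (fun d c => d.modify c 0 (· - 1)) (PySem.Dict.counter l1) l2).values.any
            (fun count => count != 0) = true := by
          rw [List.any_eq_true]
          refine ⟨(List.foldl (fun d c => d.modify c 0 (· - 1)) (PySem.Dict.counter l1) l2).getD a 0, ?_, ?_⟩
          · rw [PySem.Dict.values_eq_map_keys _ hnd 0]
            exact List.mem_map_of_mem hmem
          · rw [getD_foldl_modify_sub_one, PySem.Dict.getD_counter]
            simpa using fun h => ha (by omega)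
        simp [hany]
      · rw [pvAProcess_eq_none l2 _ hcont]
  · rw [if_pos hlen, if_pos hlen]

-- ===== VERDICT (by name: the statement is the Claim_ definition above) =====
theorem steps_to_convert_one_string_to_another_string_spec : Claim_equal_steps_to_convert_one_string_to_another_string := by
  intro str1 str2 _
  exact pv_main str1 str2
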